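-- pv_equiv track=rewrite | github.com/breivens/scriptingtalen | additional exercise series/series_08 [Python]/M/Mobile phone.py | decodeMultiTap
-- ===== SOURCE A (Python) =====
-- keys = {0: ' ', 2: 'ABC', 3: 'DEF', 4: 'GHI', 5: 'JKL', 6: 'MNO', 7: 'PQRS', 8: 'TUV', 9: 'WXYZ'}
--
-- def digits2letters(sequence) -> str:
--     return keys[int(sequence[0])][len(sequence) - 1]
--
-- def decodeMultiTap(digits: str) -> str:  # faster
--     string = group = ''
--     for digit in digits:
--         if group and digit not in group:
--             string += digits2letters(group)
--             group = ''
--         if digit.isdigit():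
--             group += digit
--     if group:
--         string += digits2letters(group)
--     return string
-- ===== SOURCE B (Python) =====
-- keys = {0: ' ', 2: 'ABC', 3: 'DEF', 4: 'GHI', 5: 'JKL', 6: 'MNO', 7: 'PQRS', 8: 'TUV', 9: 'WXYZ'}
--
-- def decodeMultiTap(digits: str) -> str:
--     out = []
--     i = 0
--     n = len(digits)
--     while i < n:
--         j = i + 1
--         while j < n and digits[j] == digits[i]:
--             j += 1
--         if digits[i].isdigit():
--             out.append(keys[int(digits[i])][j - i - 1])
--         i = j
--     return ''.join(out)
-- ===== Notes on version B (the rewrite author's own statement) =====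
-- stated objective: alternative
-- what changed: Replaces A's flush-on-change state machine (two string accumulators, membership test, trailing flush) with a two-pointer scan over maximal runs of equal characters that decodes each run directly and joins at the end.
-- outside the precondition, e.g. on decodeMultiTap('1'): A raises KeyError, B raises KeyError; on decodeMultiTap('2222'): A raises IndexError, B raises IndexError
import Mathlib
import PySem

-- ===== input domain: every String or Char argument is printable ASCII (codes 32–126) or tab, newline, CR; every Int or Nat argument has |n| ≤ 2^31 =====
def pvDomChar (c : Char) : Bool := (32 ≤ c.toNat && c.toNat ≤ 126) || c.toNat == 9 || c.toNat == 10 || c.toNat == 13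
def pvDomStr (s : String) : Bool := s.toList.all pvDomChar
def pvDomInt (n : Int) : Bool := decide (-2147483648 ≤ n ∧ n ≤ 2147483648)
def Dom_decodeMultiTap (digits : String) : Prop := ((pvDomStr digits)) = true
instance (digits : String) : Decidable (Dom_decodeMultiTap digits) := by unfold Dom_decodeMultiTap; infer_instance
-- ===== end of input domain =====

-- B replaces A's flush-on-change accumulator state machine with a two-pointer scan over
-- maximal runs of equal characters (objective: alternative; same O(n) cost).


-- ===== PORT A =====
-- the module-level constant `keys` (shared by both Pythons)
def pvKeys : PySem.Dict Int String :=
  PySem.Dict.ofList [(0, " "), (2, "ABC"), (3, "DEF"), (4, "GHI"), (5, "JKL"),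
                     (6, "MNO"), (7, "PQRS"), (8, "TUV"), (9, "WXYZ")]

-- keys[int(sequence[0])][len(sequence) - 1]; none = the KeyError/IndexError Python raises (excluded by Pre_)
def digits2letters (sequence : List Char) : Option Char := do
  let c ← sequence.head?
  let n ← PySem.Int.ofStr? (String.mk [c])
  let s ← PySem.Dict.get? pvKeys n
  PySem.Str.pyGet? s ((sequence.length : Int) - 1)

-- appending an Option Char to the accumulator ('' only on inputs Pre_ excludes)
def optStr (o : Option Char) : String :=
  match o with
  | some c => String.singleton c
  | none => ""

-- one iteration of A's for-loop over (string, group)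
def aStep (st : String × List Char) (digit : Char) : String × List Char :=
  let st1 := if st.2 ≠ [] ∧ st.2.contains digit = false
             then (st.1 ++ optStr (digits2letters st.2), ([] : List Char))
             else st
  if PySem.Chars.isdigit digit then (st1.1, st1.2 ++ [digit]) else st1

-- the trailing 'if group: string += digits2letters(group)'
def aFinish (st : String × List Char) : String :=
  if st.2 ≠ [] then st.1 ++ optStr (digits2letters st.2) else st.1

def decodeMultiTap (digits : String) : String :=
  aFinish (digits.toList.foldl aStep ("", []))

-- ===== PORT B =====
-- keys[int(c)][k - 1] for a run of k copies of c
def altLetter (c : Char) (k : Nat) : Option Char := do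
  let n ← PySem.Int.ofStr? (String.mk [c])
  let s ← PySem.Dict.get? pvKeys n
  PySem.Str.pyGet? s ((k : Int) - 1)

-- the outer while-loop: take the maximal run at the front, decode it, continue after it
def altGo : List Char → String
  | [] => ""
  | c :: rest =>
      (if PySem.Chars.isdigit c
       then optStr (altLetter c ((rest.takeWhile (· == c)).length + 1))
       else "")
      ++ altGo (rest.dropWhile (· == c))
termination_by l => l.length
decreasing_by
  simp only [List.length_cons]
  exact Nat.lt_succ_of_le (List.length_dropWhile_le _ _)

def decodeMultiTap_alt (digits : String) : String := altGo digits.toList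

-- ===== PRECONDITION & SPEC =====
-- length of the multi-tap alphabet of a digit key
def keyLen (c : Char) : Nat := if c = '0' then 1 else if c = '7' ∨ c = '9' then 4 else 3

-- a maximal run of equal characters is fine if it is not digits, or is a run of a
-- mapped key ('1' is unmapped: KeyError) no longer than that key's alphabet (else IndexError)
def preRun (g : List Char) : Bool :=
  match g with
  | [] => true
  | c :: _ => !PySem.Chars.isdigit c || (decide (c ≠ '1') && decide (g.length ≤ keyLen c))

-- Pre_ excludes exactly the inputs where Python A raises (KeyError on digit '1',
-- IndexError on a run of a digit longer than its key's letters); B raises there too.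
def Pre_decodeMultiTap (digits : String) : Prop :=
  (digits.toList.splitBy (· == ·)).all preRun = true

instance (digits : String) : Decidable (Pre_decodeMultiTap digits) := by
  unfold Pre_decodeMultiTap; infer_instance

def pvWitness_decodeMultiTap : String := "4433555 555666096 earth"

def Spec_decodeMultiTap (digits : String) (out : String) : Prop := out = decodeMultiTap_alt digits
instance (digits : String) (out : String) : Decidable (Spec_decodeMultiTap digits out) := by unfold Spec_decodeMultiTap; infer_instance

-- ===== CLAIM (what is proved, stated in full; the proofs are below) =====
def Claim_equal_decodeMultiTap : Prop := ∀ (digits : String), Dom_decodeMultiTap digits → Pre_decodeMultiTap digits → Spec_decodeMultiTap digits (decodeMultiTap digits)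

-- ===== LEMMAS AND PROOFS =====

theorem altGo_nil : altGo [] = "" := by simp [altGo]

theorem altGo_cons (c : Char) (rest : List Char) :
    altGo (c :: rest) =
      (if PySem.Chars.isdigit c
       then optStr (altLetter c ((rest.takeWhile (· == c)).length + 1))
       else "")
      ++ altGo (rest.dropWhile (· == c)) := by
  rw [altGo]

-- A's group is always List.replicate k c; its letter equals B's run letter
theorem letter_eq (c : Char) (k : Nat) :
    digits2letters (List.replicate (k + 1) c) = altLetter c (k + 1) := by
  simp [digits2letters, altLetter, List.head?_replicate]

-- continuation of B on a pending run of (k+1) copies of c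
def altCont (c : Char) (k : Nat) : List Char → String
  | [] => optStr (altLetter c k)
  | d :: rest =>
      if d = c then altCont c (k + 1) rest
      else optStr (altLetter c k) ++ altGo (d :: rest)

theorem altCont_eq (c : Char) (l : List Char) : ∀ k : Nat,
    altCont c k l =
      optStr (altLetter c (k + (l.takeWhile (· == c)).length)) ++ altGo (l.dropWhile (· == c)) := by
  induction l with
  | nil => intro k; simp [altCont, altGo_nil]
  | cons d rest ih =>
      intro k
      by_cases h : d = c
      · subst h
        simp only [altCont, ih (k + 1), List.takeWhile, List.dropWhile,
          BEq.rfl, List.length_cons, if_pos trivial]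
        ring_nf
      · have hb : (d == c) = false := by simp [h]
        simp [altCont, h, List.takeWhile, List.dropWhile, hb]

-- skipping a non-digit run one character at a time changes nothing
theorem altGo_dropWhile_nondigit (d : Char) (hd : PySem.Chars.isdigit d = false) (rest : List Char) :
    altGo (rest.dropWhile (· == d)) = altGo rest := by
  cases rest with
  | nil => simp
  | cons e r =>
      by_cases h : e = d
      · subst h
        rw [altGo_cons, hd]
        simp [List.dropWhile]
      · have hb : (e == d) = false := by simp [h]
        simp [List.dropWhile, hb]

theorem altGo_cons_nondigit (d : Char) (hd : PySem.Chars.isdigit d = false) (rest : List Char) :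
    altGo (d :: rest) = altGo rest := by
  rw [altGo_cons, hd]
  simp [altGo_dropWhile_nondigit d hd rest]

theorem altGo_cons_digit (d : Char) (hd : PySem.Chars.isdigit d = true) (rest : List Char) :
    altGo (d :: rest) = altCont d 1 rest := by
  rw [altGo_cons, hd, altCont_eq d rest 1, Nat.add_comm]
  simp

theorem contains_replicate_succ (c d : Char) (k : Nat) :
    (List.replicate (k + 1) c).contains d = (d == c) := by
  by_cases h : d = c
  · subst h; simp
  · simp [List.mem_replicate, h]

-- the main invariant: A's fold from an empty / pending-run state equals B's scan
theorem main_inv (l : List Char) :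
    (∀ s : String, aFinish (l.foldl aStep (s, [])) = s ++ altGo l) ∧
    (∀ (c : Char) (k : Nat) (s : String), PySem.Chars.isdigit c = true →
      aFinish (l.foldl aStep (s, List.replicate (k + 1) c)) = s ++ altCont c (k + 1) l) := by
  induction l with
  | nil =>
      constructor
      · intro s; simp [aFinish, altGo_nil]
      · intro c k s _hc
        simp [aFinish, altCont, letter_eq]
  | cons d rest ih =>
      constructor
      · intro s
        by_cases hd : PySem.Chars.isdigit d = true
        · have : aStep (s, ([] : List Char)) d = (s, [d]) := by
            simp [aStep, hd]
          rw [List.foldl_cons, this]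
          have h1 := ih.2 d 0 s hd
          simpa [altGo_cons_digit d hd rest] using h1
        · have hd' : PySem.Chars.isdigit d = false := by simpa using hd
          have : aStep (s, ([] : List Char)) d = (s, []) := by
            simp [aStep, hd']
          rw [List.foldl_cons, this, ih.1 s, altGo_cons_nondigit d hd' rest]
      · intro c k s hc
        by_cases h : d = c
        · subst h
          have : aStep (s, List.replicate (k + 1) d) d = (s, List.replicate (k + 2) d) := by
            simp [aStep, hc, List.replicate_succ']
          rw [List.foldl_cons, this]
          have h1 := ih.2 d (k + 1) s hc
          rw [h1]
          simp [altCont]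
        · have hb : (d == c) = false := by simp [h]
          have hflush : (List.replicate (k + 1) c).contains d = false := by
            rw [contains_replicate_succ]; exact hb
          by_cases hd : PySem.Chars.isdigit d = true
          · have : aStep (s, List.replicate (k + 1) c) d =
                (s ++ optStr (digits2letters (List.replicate (k + 1) c)), [d]) := by
              simp [aStep, h, hd]
            rw [List.foldl_cons, this]
            have h1 := ih.2 d 0 (s ++ optStr (digits2letters (List.replicate (k + 1) c))) hd
            rw [show List.replicate (0 + 1) d = [d] from rfl] at h1
            rw [h1, letter_eq]
            simp [altCont, h, altGo_cons_digit d hd rest, String.append_assoc]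
          · have hd' : PySem.Chars.isdigit d = false := by simpa using hd
            have : aStep (s, List.replicate (k + 1) c) d =
                (s ++ optStr (digits2letters (List.replicate (k + 1) c)), []) := by
              simp [aStep, h, hd']
            rw [List.foldl_cons, this]
            have h1 := ih.1 (s ++ optStr (digits2letters (List.replicate (k + 1) c)))
            rw [h1, letter_eq]
            simp [altCont, h, altGo_cons_nondigit d hd' rest, String.append_assoc]

-- ===== VERDICT (by name: the statement is the Claim_ definition above) =====
theorem decodeMultiTap_spec : Claim_equal_decodeMultiTap := by
  intro digits _hdom _hpre
  show decodeMultiTap digits = decodeMultiTap_alt digits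
  unfold decodeMultiTap decodeMultiTap_alt
  have h := (main_inv digits.toList).1 ""
  simpa using h
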